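-- pv_equiv track=rewrite | github.com/azure6806/Library | library-1.py | replace_str
-- ===== SOURCE A (Python) =====
-- def replace_str(s, old, new):
--     result = ""
--     i = 0
--     len_old = len(old)
--     while i < len(s):
--         if s[i:i + len_old] == old:
--             result += new
--             i += len_old
--         else:
--             result += s[i]
--             i += 1
--     return result
-- ===== SOURCE B (Python) =====
-- def replace_str(s, old, new):
--     return s.replace(old, new)
-- ===== Notes on version B (the rewrite author's own statement) =====
-- stated objective: idiomatic
-- what changed: Replaces A's hand-written index loop with quadratic repeated string concatenation by the built-in str.replace, which scans once and joins the pieces.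
-- outside the precondition, e.g. on replace_str('', '', 'x'): A returns '', B returns 'x'
import Mathlib
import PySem

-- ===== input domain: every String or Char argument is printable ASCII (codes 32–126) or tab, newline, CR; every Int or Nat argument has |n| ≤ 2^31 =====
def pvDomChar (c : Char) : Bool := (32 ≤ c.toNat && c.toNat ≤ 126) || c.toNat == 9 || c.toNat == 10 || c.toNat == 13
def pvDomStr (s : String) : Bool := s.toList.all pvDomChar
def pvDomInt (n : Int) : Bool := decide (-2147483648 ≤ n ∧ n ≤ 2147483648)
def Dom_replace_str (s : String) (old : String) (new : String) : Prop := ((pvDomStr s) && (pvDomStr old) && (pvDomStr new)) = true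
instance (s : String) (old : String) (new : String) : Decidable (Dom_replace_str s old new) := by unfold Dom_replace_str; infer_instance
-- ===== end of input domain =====

-- B replaces A's hand-written index loop (quadratic string concatenation) by the built-in str.replace; equivalence is proved for old ≠ "" (A loops forever on old = "" with nonempty s).

-- ===== PORT A =====
-- A's while loop over the index i, with fuel = s.length (enough whenever old ≠ "",
-- since i then grows by at least 1 each iteration; for old = "" the Python loop diverges).
def replace_strGo (s old new : List Char) : Nat → Nat → List Char → List Char
  | 0, _, result => result
  | fuel + 1, i, result =>
    if i < s.length then
      if PySem.List.slice s (some (i : Int)) (some ((i : Int) + (old.length : Int))) = old then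
        replace_strGo s old new fuel (i + old.length) (result ++ new)
      else
        match PySem.List.pyGet? s (i : Int) with
        | some c => replace_strGo s old new fuel (i + 1) (result ++ [c])
        | none => result
    else result

def replace_str (s : String) (old : String) (new : String) : String :=
  String.ofList (replace_strGo s.toList old.toList new.toList s.toList.length 0 [])

-- ===== PORT B =====
def replace_str_alt (s : String) (old : String) (new : String) : String :=
  PySem.Str.replace s old new

-- ===== PRECONDITION & SPEC =====
-- Pre_ excludes old = "": there the Python A loops forever for every nonempty s, and on
-- s = "" its result "" is an accident that disagrees with str.replace's standard insertion behaviour.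
def Pre_replace_str (s : String) (old : String) (new : String) : Prop := old ≠ ""
instance (s : String) (old : String) (new : String) : Decidable (Pre_replace_str s old new) := by unfold Pre_replace_str; infer_instance
def pvWitness_replace_str : String × String × String := ("abcabc", "bc", "X")

def Spec_replace_str (s : String) (old : String) (new : String) (out : String) : Prop := out = replace_str_alt s old new
instance (s : String) (old : String) (new : String) (out : String) : Decidable (Spec_replace_str s old new out) := by unfold Spec_replace_str; infer_instance

-- ===== CLAIM (what is proved, stated in full; the proofs are below) =====
def Claim_equal_replace_str : Prop := ∀ (s : String) (old : String) (new : String), Dom_replace_str s old new → Pre_replace_str s old new → Spec_replace_str s old new (replace_str s old new)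

-- ===== LEMMAS AND PROOFS =====

-- accumulator lemma for PySem's replace.go
lemma pv_go_acc (old new : List Char) :
    ∀ (fuel : Nat) (l acc : List Char),
      PySem.Chars.replace.go old new fuel l acc = acc.reverse ++ PySem.Chars.replace.go old new fuel l [] := by
  intro fuel
  induction fuel with
  | zero => intro l acc; simp [PySem.Chars.replace.go]
  | succ f ih =>
    intro l acc
    cases l with
    | nil => simp [PySem.Chars.replace.go]
    | cons c t =>
      simp only [PySem.Chars.replace.go]
      split_ifs with h
      · rw [ih _ (new.reverse ++ acc), ih _ (new.reverse ++ [])]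
        simp
      · rw [ih _ (c :: acc), ih _ [c]]
        simp

-- A's index loop equals PySem's suffix loop, in lockstep on the fuel.
lemma pv_go_eq (old new : List Char) (hold : old ≠ []) (s : List Char) :
    ∀ (fuel i : Nat) (res : List Char), s.length - i ≤ fuel →
      replace_strGo s old new fuel i res = res ++ PySem.Chars.replace.go old new fuel (s.drop i) [] := by
  intro fuel
  induction fuel with
  | zero =>
    intro i res hf
    have : s.drop i = [] := List.drop_eq_nil_of_le (by omega)
    simp [replace_strGo, PySem.Chars.replace.go, this]
  | succ f ih =>
    intro i res hf
    rcases Nat.lt_or_ge i s.length with hi | hi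
    · have hdrop : s.drop i ≠ [] := by
        simp [List.drop_eq_nil_iff]; omega
      obtain ⟨c, t, hct⟩ := List.exists_cons_of_ne_nil hdrop
      have hslice : PySem.List.slice s (some (i : Int)) (some ((i : Int) + (old.length : Int))) =
          (s.drop i).take old.length := PySem.List.slice_natCast_add s i old.length
      have hpref : (PySem.List.slice s (some (i : Int)) (some ((i : Int) + (old.length : Int))) = old)
          ↔ old <+: s.drop i := by
        rw [hslice]
        constructor
        · intro h; exact h ▸ List.take_prefix _ _
        · intro h; exact (List.prefix_iff_eq_take.mp h).symm
      simp only [replace_strGo, if_pos hi]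
      rw [hct]
      simp only [PySem.Chars.replace.go]
      by_cases hm : old <+: s.drop i
      · -- old matches at i
        have hlen : old.length ≤ s.length - i := by
          have := hm.length_le; simp at this; omega
        have hpos : 0 < old.length := List.length_pos_of_ne_nil hold
        have hiP : old.isPrefixOf (c :: t) = true := by
          rw [← hct]; exact List.isPrefixOf_iff_prefix.mpr hm
        rw [if_pos (hpref.mpr hm), if_pos hiP]
        rw [ih (i + old.length) (res ++ new) (by omega)]
        have hdd : (c :: t).drop old.length = s.drop (i + old.length) := by
          rw [← hct, List.drop_drop]; try ring_nf
        rw [hdd]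
        rw [pv_go_acc old new f (s.drop (i + old.length)) (new.reverse ++ [])]
        simp
      · -- no match: consume one character
        have hget : PySem.List.pyGet? s (i : Int) = some c := by
          have : s[i]? = some c := by
            have : (s.drop i)[0]? = some c := by rw [hct]; rfl
            simpa [List.getElem?_drop] using this
          simpa [PySem.List.pyGet?_natCast] using this
        have hiP : old.isPrefixOf (c :: t) = false := by
          rw [← hct]
          exact Bool.eq_false_iff.mpr (fun hb => hm (List.isPrefixOf_iff_prefix.mp hb))
        rw [if_neg (fun hc => hm (hpref.mp hc)), if_neg (by simp [hiP]), hget]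
        dsimp only
        rw [ih (i + 1) (res ++ [c]) (by omega), pv_go_acc old new f t [c]]
        have ht : t = s.drop (i + 1) := by
          have := congrArg List.tail hct
          simpa [List.tail_drop] using this.symm
        rw [← ht]; simp
    · have hdrop : s.drop i = [] := List.drop_eq_nil_of_le hi
      simp [replace_strGo, PySem.Chars.replace.go, hdrop, Nat.not_lt.mpr hi]

lemma pv_ofList_toList (s : String) : String.ofList s.toList = s := by
  simp [String.ofList]

-- ===== VERDICT (by name: the statement is the Claim_ definition above) =====
theorem replace_str_spec : Claim_equal_replace_str := by
  intro s old new _ hpre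
  unfold Spec_replace_str replace_str replace_str_alt
  have hold : old.toList ≠ [] := by
    intro h
    exact hpre (by simpa using h)
  have h1 : (PySem.Str.replace s old new).toList
      = PySem.Chars.replace s.toList old.toList new.toList := PySem.Str.toList_replace s old new
  have h2 : PySem.Chars.replace s.toList old.toList new.toList
      = PySem.Chars.replace.go old.toList new.toList s.toList.length s.toList [] := by
    rw [PySem.Chars.replace]
    rw [if_neg (by simpa [List.isEmpty_iff] using hold)]
  have h3 := pv_go_eq old.toList new.toList hold s.toList s.toList.length 0 [] (by omega)
  simp only [List.drop_zero, List.nil_append] at h3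
  rw [h3, ← h2, ← h1, pv_ofList_toList]
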